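-- pv_equiv track=rewrite | github.com/kxi2205/multimodal-real-time-sign-2-text-and-speech | scripts/record_gestures.py | decode_filename
-- ===== SOURCE A (Python) =====
-- def decode_filename(name: str) -> str:
--     """Decode filename back to original form with punctuation."""
--     # Reverse the encoding
--     replacements = {
--         '_question': '?',
--         '_exclamation': '!',
--         '_dot': '.',
--         '_comma': ',',
--         '_colon': ':',
--         '_semicolon': ';',
--     }
--
--     for encoded, original in replacements.items():
--         name = name.replace(encoded, original)
--
--     # Replace underscores with spaces
--     name = name.replace('_', ' ')
--     return name
-- ===== SOURCE B (Python) =====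
-- def _match_token(name, i):
--     for tok, punct in (("_question", "?"), ("_exclamation", "!"), ("_dot", "."),
--                        ("_comma", ","), ("_colon", ":"), ("_semicolon", ";")):
--         if name.startswith(tok, i):
--             return punct, len(tok)
--     return None
--
--
-- def decode_filename(name: str) -> str:
--     """Decode filename back to original form with punctuation (single pass)."""
--     out = []
--     i = 0
--     n = len(name)
--     while i < n:
--         m = _match_token(name, i)
--         if m is not None:
--             punct, k = m
--             out.append(punct)
--             i += k
--         else:
--             out.append(' ' if name[i] == '_' else name[i])
--             i += 1
--     return ''.join(out)
-- ===== Notes on version B (the rewrite author's own statement) =====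
-- stated objective: alternative
-- what changed: A runs seven sequential str.replace passes over the whole string; B decodes in a single left-to-right scan that greedily matches the six punctuation tokens at each position (bare '_' as fallback) and emits the output once.
import Mathlib
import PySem

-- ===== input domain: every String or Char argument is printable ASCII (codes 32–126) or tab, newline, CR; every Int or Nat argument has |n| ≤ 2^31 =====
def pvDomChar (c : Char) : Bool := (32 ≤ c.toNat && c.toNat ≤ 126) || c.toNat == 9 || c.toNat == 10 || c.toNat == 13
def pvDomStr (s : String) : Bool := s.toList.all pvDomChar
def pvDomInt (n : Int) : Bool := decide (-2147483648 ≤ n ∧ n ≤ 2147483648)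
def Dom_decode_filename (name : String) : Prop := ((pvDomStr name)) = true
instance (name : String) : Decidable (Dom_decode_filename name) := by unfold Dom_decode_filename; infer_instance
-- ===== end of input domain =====

-- B replaces A's seven sequential str.replace passes by a single left-to-right scan that
-- matches the six tokens (bare '_' as fallback) at each position; objective: alternative
-- (single pass instead of seven), return value proved identical on all inputs.

-- ===== PORT A =====
-- literal transliteration of A: seven sequential replace passes
def decode_filename (name : String) : String :=
  let n1 := PySem.Str.replace name "_question" "?"
  let n2 := PySem.Str.replace n1 "_exclamation" "!"
  let n3 := PySem.Str.replace n2 "_dot" "."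
  let n4 := PySem.Str.replace n3 "_comma" ","
  let n5 := PySem.Str.replace n4 "_colon" ":"
  let n6 := PySem.Str.replace n5 "_semicolon" ";"
  let n7 := PySem.Str.replace n6 "_" " "
  n7

-- ===== PORT B =====
-- _match_token(name, i): try the six tokens in order at the current position
-- (the constant token loop of Source B is unrolled into the if-chain it denotes)
def pvMatchTok (l : List Char) : Option (Char × Nat) :=
  if List.isPrefixOf ['_','q','u','e','s','t','i','o','n'] l then some ('?', 9)
  else if List.isPrefixOf ['_','e','x','c','l','a','m','a','t','i','o','n'] l then some ('!', 12)
  else if List.isPrefixOf ['_','d','o','t'] l then some ('.', 4)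
  else if List.isPrefixOf ['_','c','o','m','m','a'] l then some (',', 6)
  else if List.isPrefixOf ['_','c','o','l','o','n'] l then some (':', 6)
  else if List.isPrefixOf ['_','s','e','m','i','c','o','l','o','n'] l then some (';', 10)
  else none

theorem pvMatchTok_bound {l : List Char} {p : Char} {k : Nat}
    (h : pvMatchTok l = some (p, k)) : 0 < k ∧ k ≤ l.length := by
  unfold pvMatchTok at h
  split_ifs at h with h1 h2 h3 h4 h5 h6 <;> cases h
  all_goals
    refine ⟨by omega, ?_⟩
    first
    | simpa using (List.isPrefixOf_iff_prefix.mp h1).length_le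
    | simpa using (List.isPrefixOf_iff_prefix.mp h2).length_le
    | simpa using (List.isPrefixOf_iff_prefix.mp h3).length_le
    | simpa using (List.isPrefixOf_iff_prefix.mp h4).length_le
    | simpa using (List.isPrefixOf_iff_prefix.mp h5).length_le
    | simpa using (List.isPrefixOf_iff_prefix.mp h6).length_le

-- the single left-to-right pass of Source B's while-loop, emitting into the output list
def pvScan (l : List Char) : List Char :=
  match l with
  | [] => []
  | c :: t =>
    match hm : pvMatchTok (c :: t) with
    | some (p, k) => p :: pvScan ((c :: t).drop k)
    | none => (if c = '_' then ' ' else c) :: pvScan t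
termination_by l.length
decreasing_by
  · obtain ⟨hk1, hk2⟩ := pvMatchTok_bound hm
    simp only [List.length_drop]
    omega
  · simp

def decode_filename_alt (name : String) : String :=
  String.ofList (pvScan name.toList)

-- ===== PRECONDITION & SPEC =====
def Spec_decode_filename (name : String) (out : String) : Prop := out = decode_filename_alt name
instance (name : String) (out : String) : Decidable (Spec_decode_filename name out) := by unfold Spec_decode_filename; infer_instance

-- ===== CLAIM (what is proved, stated in full; the proofs are below) =====
def Claim_equal_decode_filename : Prop := ∀ (name : String), Dom_decode_filename name → Spec_decode_filename name (decode_filename name)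

-- ===== LEMMAS AND PROOFS =====

theorem pvScan_nil : pvScan [] = [] := by
  rw [pvScan.eq_def]

theorem pvScan_cons_some {c : Char} {t : List Char} {p : Char} {k : Nat}
    (h : pvMatchTok (c :: t) = some (p, k)) :
    pvScan (c :: t) = p :: pvScan ((c :: t).drop k) := by
  rw [pvScan.eq_def]
  split
  · simp_all
  · split <;> simp_all

theorem pvScan_cons_none {c : Char} {t : List Char}
    (h : pvMatchTok (c :: t) = none) :
    pvScan (c :: t) = (if c = '_' then ' ' else c) :: pvScan t := by
  rw [pvScan.eq_def]
  split
  · simp_all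
  · split <;> simp_all

-- a clean accumulator-free reading of PySem.Chars.replace (greedy left-to-right, non-overlapping)
def pvRep (p n : List Char) : List Char → List Char
  | [] => []
  | c :: t =>
    if h : List.isPrefixOf p (c :: t) = true ∧ p ≠ [] then
      n ++ pvRep p n ((c :: t).drop p.length)
    else c :: pvRep p n t
termination_by l => l.length
decreasing_by
  · have hle := (List.isPrefixOf_iff_prefix.mp h.1).length_le
    have hpos : p.length ≠ 0 := by simpa using h.2
    simp only [List.length_drop]
    omega
  · simp

theorem pvGo_eq_rep (old new : List Char) (hold : old ≠ []) :
    ∀ (fuel : Nat) (l acc : List Char), l.length ≤ fuel →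
      PySem.Chars.replace.go old new fuel l acc = acc.reverse ++ pvRep old new l := by
  intro fuel
  induction fuel with
  | zero =>
    intro l acc hl
    have hnil : l = [] := by cases l <;> simp_all
    subst hnil
    simp [PySem.Chars.replace.go, pvRep]
  | succ f ih =>
    intro l acc hl
    cases l with
    | nil => simp [PySem.Chars.replace.go, pvRep]
    | cons c t =>
      rw [PySem.Chars.replace.go]
      by_cases hp : List.isPrefixOf old (c :: t) = true
      · have hle := (List.isPrefixOf_iff_prefix.mp hp).length_le
        have hpos : old.length ≠ 0 := by simpa using hold
        rw [if_pos hp, ih _ _ (by simp only [List.length_drop]; simp at hl ⊢; omega)]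
        rw [pvRep, dif_pos ⟨hp, hold⟩]
        simp
      · rw [if_neg hp, ih _ _ (by simp at hl ⊢; omega)]
        rw [pvRep, dif_neg (by simp [hp])]
        simp

theorem pvReplace_eq_rep (s old new : List Char) (h : old ≠ []) :
    PySem.Chars.replace s old new = pvRep old new s := by
  unfold PySem.Chars.replace
  rw [if_neg (by simp [List.isEmpty_iff, h])]
  simpa using pvGo_eq_rep old new h s.length s [] le_rfl

theorem pvRep_nil (p n : List Char) : pvRep p n [] = [] := by
  rw [pvRep]

theorem pvRep_nomatch {p : List Char} (n : List Char) {c : Char} {t : List Char}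
    (h : List.isPrefixOf p (c :: t) = false) :
    pvRep p n (c :: t) = c :: pvRep p n t := by
  rw [pvRep, dif_neg (by simp [h])]

theorem pvRep_cons_pos {p : List Char} (n : List Char) {c : Char} {t : List Char}
    (h : List.isPrefixOf p (c :: t) = true) (hp : p ≠ []) :
    pvRep p n (c :: t) = n ++ pvRep p n ((c :: t).drop p.length) := by
  rw [pvRep, dif_pos ⟨h, hp⟩]

theorem pvRep_match {p : List Char} (n : List Char) (hp : p ≠ []) (x : List Char) :
    pvRep p n (p ++ x) = n ++ pvRep p n x := by
  cases p with
  | nil => exact absurd rfl hp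
  | cons a p' =>
    rw [List.cons_append, pvRep_cons_pos n (by
        exact List.isPrefixOf_iff_prefix.mpr (by exact ⟨x, by simp⟩)) hp]
    congr 1
    rw [← List.cons_append, List.drop_left]

theorem pvRep_push {v n : List Char} {c : Char} (hc : c ≠ '_') (x : List Char) :
    pvRep ('_' :: v) n (c :: x) = c :: pvRep ('_' :: v) n x :=
  pvRep_nomatch n (by simp [List.isPrefixOf, Ne.symm hc])

theorem pvRep_skip {v n : List Char} :
    ∀ (w : List Char), '_' ∉ w →
      ∀ x, pvRep ('_' :: v) n (w ++ x) = w ++ pvRep ('_' :: v) n x := by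
  intro w
  induction w with
  | nil => intro _ x; simp
  | cons a w' ih =>
    intro hw x
    have ha : a ≠ '_' := by intro h; exact hw (by simp [h])
    rw [List.cons_append, pvRep_push ha, ih (by intro h; exact hw (by simp [h])) x,
        List.cons_append]

theorem pvRep_prefix_back {v : List Char} {q : Char} :
    ∀ (x w : List Char), '_' ∉ w → q ∉ w →
      List.isPrefixOf w (pvRep ('_' :: v) [q] x) = true → List.isPrefixOf w x = true := by
  intro x
  induction x with
  | nil =>
    intro w _ _ h
    rw [pvRep_nil] at h
    cases w with
    | nil => simp
    | cons a w' => simp [List.isPrefixOf] at h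
  | cons c t ih =>
    intro w hw hq h
    cases hcond : List.isPrefixOf ('_' :: v) (c :: t) with
    | true =>
      rw [pvRep_cons_pos [q] hcond (by simp)] at h
      cases w with
      | nil => simp
      | cons a w' =>
        simp only [List.cons_append, List.nil_append, List.isPrefixOf,
          Bool.and_eq_true, beq_iff_eq] at h
        exact absurd (by simp [h.1] : q ∈ a :: w') hq
    | false =>
      rw [pvRep_nomatch [q] hcond] at h
      cases w with
      | nil => simp
      | cons a w' =>
        simp only [List.isPrefixOf, Bool.and_eq_true, beq_iff_eq] at h ⊢
        refine ⟨h.1, ih w' (by intro hmem; exact hw (by simp [hmem]))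
          (by intro hmem; exact hq (by simp [hmem])) h.2⟩

theorem pv_not_prefix_append {a b : List Char}
    (hab : List.isPrefixOf a b = false) (hba : List.isPrefixOf b a = false)
    (x : List Char) : List.isPrefixOf a (b ++ x) = false := by
  cases hcase : List.isPrefixOf a (b ++ x) with
  | false => rfl
  | true =>
    have h1 := List.isPrefixOf_iff_prefix.mp hcase
    have h2 : b <+: b ++ x := List.prefix_append _ _
    rcases List.prefix_or_prefix_of_prefix h1 h2 with h3 | h3
    · exact absurd (List.isPrefixOf_iff_prefix.mpr h3) (by simp [hab])
    · exact absurd (List.isPrefixOf_iff_prefix.mpr h3) (by simp [hba])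

-- A's seven passes, composed, on char lists
def pvChain (l : List Char) : List Char :=
  pvRep ['_'] [' ']
    (pvRep ['_','s','e','m','i','c','o','l','o','n'] [';']
      (pvRep ['_','c','o','l','o','n'] [':']
        (pvRep ['_','c','o','m','m','a'] [',']
          (pvRep ['_','d','o','t'] ['.']
            (pvRep ['_','e','x','c','l','a','m','a','t','i','o','n'] ['!']
              (pvRep ['_','q','u','e','s','t','i','o','n'] ['?'] l))))))

theorem decode_eq_chain (name : String) :
    decode_filename name = String.ofList (pvChain name.toList) := by
  unfold decode_filename pvChain
  simp only [PySem.Str.replace, String.toList_ofList,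
    show "_question".toList = ['_','q','u','e','s','t','i','o','n'] from by decide,
    show "_exclamation".toList = ['_','e','x','c','l','a','m','a','t','i','o','n'] from by decide,
    show "_dot".toList = ['_','d','o','t'] from by decide,
    show "_comma".toList = ['_','c','o','m','m','a'] from by decide,
    show "_colon".toList = ['_','c','o','l','o','n'] from by decide,
    show "_semicolon".toList = ['_','s','e','m','i','c','o','l','o','n'] from by decide,
    show "_".toList = ['_'] from by decide,
    show "?".toList = ['?'] from by decide,
    show "!".toList = ['!'] from by decide,
    show ".".toList = ['.'] from by decide,
    show ",".toList = [','] from by decide,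
    show ":".toList = [':'] from by decide,
    show ";".toList = [';'] from by decide,
    show " ".toList = [' '] from by decide]
  rw [pvReplace_eq_rep _ _ _ (by decide), pvReplace_eq_rep _ _ _ (by decide),
      pvReplace_eq_rep _ _ _ (by decide), pvReplace_eq_rep _ _ _ (by decide),
      pvReplace_eq_rep _ _ _ (by decide), pvReplace_eq_rep _ _ _ (by decide),
      pvReplace_eq_rep _ _ _ (by decide)]

-- skipping one token's pass over a position where a DIFFERENT token sits
theorem pvTok_skip {wp n wj : List Char} (hj : '_' ∉ wj)
    (h1 : List.isPrefixOf wp wj = false) (h2 : List.isPrefixOf wj wp = false)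
    (x : List Char) :
    pvRep ('_' :: wp) n ('_' :: (wj ++ x)) = '_' :: (wj ++ pvRep ('_' :: wp) n x) := by
  rw [pvRep_nomatch n (by simp [List.isPrefixOf, pv_not_prefix_append h1 h2 x]),
      pvRep_skip wj hj x]

theorem pvChain_push {c : Char} (hc : c ≠ '_') (t : List Char) :
    pvChain (c :: t) = c :: pvChain t := by
  unfold pvChain
  simp only [pvRep_push hc]

theorem pvChain_tokQ (r : List Char) :
    pvChain (['_','q','u','e','s','t','i','o','n'] ++ r) = '?' :: pvChain r := by
  unfold pvChain
  rw [pvRep_match ['?'] (by decide) r, List.singleton_append]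
  simp only [pvRep_push (show ('?' : Char) ≠ '_' by decide)]

theorem pvChain_tokE (r : List Char) :
    pvChain (['_','e','x','c','l','a','m','a','t','i','o','n'] ++ r) = '!' :: pvChain r := by
  unfold pvChain
  rw [List.cons_append, pvTok_skip (by decide) (by decide) (by decide),
      show ('_' :: (['e','x','c','l','a','m','a','t','i','o','n'] ++
        pvRep ['_','q','u','e','s','t','i','o','n'] ['?'] r)) =
        ['_','e','x','c','l','a','m','a','t','i','o','n'] ++
        pvRep ['_','q','u','e','s','t','i','o','n'] ['?'] r from by simp,
      pvRep_match ['!'] (by decide), List.singleton_append]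
  simp only [pvRep_push (show ('!' : Char) ≠ '_' by decide)]

theorem pvChain_tokD (r : List Char) :
    pvChain (['_','d','o','t'] ++ r) = '.' :: pvChain r := by
  unfold pvChain
  rw [List.cons_append, pvTok_skip (by decide) (by decide) (by decide),
      ← List.cons_append, List.cons_append,
      pvTok_skip (by decide) (by decide) (by decide),
      ← List.cons_append,
      pvRep_match ['.'] (by decide), List.singleton_append]
  simp only [pvRep_push (show ('.' : Char) ≠ '_' by decide)]

theorem pvChain_tokCm (r : List Char) :
    pvChain (['_','c','o','m','m','a'] ++ r) = ',' :: pvChain r := by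
  unfold pvChain
  rw [List.cons_append, pvTok_skip (by decide) (by decide) (by decide),
      ← List.cons_append, List.cons_append,
      pvTok_skip (by decide) (by decide) (by decide),
      ← List.cons_append, List.cons_append,
      pvTok_skip (by decide) (by decide) (by decide),
      ← List.cons_append,
      pvRep_match [','] (by decide), List.singleton_append]
  simp only [pvRep_push (show (',' : Char) ≠ '_' by decide)]

theorem pvChain_tokCl (r : List Char) :
    pvChain (['_','c','o','l','o','n'] ++ r) = ':' :: pvChain r := by
  unfold pvChain
  rw [List.cons_append, pvTok_skip (by decide) (by decide) (by decide),
      ← List.cons_append, List.cons_append,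
      pvTok_skip (by decide) (by decide) (by decide),
      ← List.cons_append, List.cons_append,
      pvTok_skip (by decide) (by decide) (by decide),
      ← List.cons_append, List.cons_append,
      pvTok_skip (by decide) (by decide) (by decide),
      ← List.cons_append,
      pvRep_match [':'] (by decide), List.singleton_append]
  simp only [pvRep_push (show (':' : Char) ≠ '_' by decide)]

theorem pvChain_tokS (r : List Char) :
    pvChain (['_','s','e','m','i','c','o','l','o','n'] ++ r) = ';' :: pvChain r := by
  unfold pvChain
  rw [List.cons_append, pvTok_skip (by decide) (by decide) (by decide),
      ← List.cons_append, List.cons_append,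
      pvTok_skip (by decide) (by decide) (by decide),
      ← List.cons_append, List.cons_append,
      pvTok_skip (by decide) (by decide) (by decide),
      ← List.cons_append, List.cons_append,
      pvTok_skip (by decide) (by decide) (by decide),
      ← List.cons_append, List.cons_append,
      pvTok_skip (by decide) (by decide) (by decide),
      ← List.cons_append,
      pvRep_match [';'] (by decide), List.singleton_append]
  simp only [pvRep_push (show (';' : Char) ≠ '_' by decide)]

theorem pvChain_under {t : List Char}
    (h1 : List.isPrefixOf ['q','u','e','s','t','i','o','n'] t = false)
    (h2 : List.isPrefixOf ['e','x','c','l','a','m','a','t','i','o','n'] t = false)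
    (h3 : List.isPrefixOf ['d','o','t'] t = false)
    (h4 : List.isPrefixOf ['c','o','m','m','a'] t = false)
    (h5 : List.isPrefixOf ['c','o','l','o','n'] t = false)
    (h6 : List.isPrefixOf ['s','e','m','i','c','o','l','o','n'] t = false) :
    pvChain ('_' :: t) = ' ' :: pvChain t := by
  unfold pvChain
  rw [pvRep_nomatch ['?'] (by simp [List.isPrefixOf, h1])]
  have h2' : List.isPrefixOf ['e','x','c','l','a','m','a','t','i','o','n']
      (pvRep ['_','q','u','e','s','t','i','o','n'] ['?'] t) = false := by
    cases hc : List.isPrefixOf ['e','x','c','l','a','m','a','t','i','o','n']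
        (pvRep ['_','q','u','e','s','t','i','o','n'] ['?'] t) with
    | false => rfl
    | true =>
      exact absurd (pvRep_prefix_back t _ (by decide) (by decide) hc) (by simp [h2])
  rw [pvRep_nomatch ['!'] (by simp [List.isPrefixOf, h2'])]
  have h3' : List.isPrefixOf ['d','o','t']
      (pvRep ['_','e','x','c','l','a','m','a','t','i','o','n'] ['!']
        (pvRep ['_','q','u','e','s','t','i','o','n'] ['?'] t)) = false := by
    cases hc : List.isPrefixOf ['d','o','t'] _ with
    | false => rfl
    | true =>
      exact absurd (pvRep_prefix_back t _ (by decide) (by decide)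
        (pvRep_prefix_back _ _ (by decide) (by decide) hc)) (by simp [h3])
  rw [pvRep_nomatch ['.'] (by simp [List.isPrefixOf, h3'])]
  have h4' : List.isPrefixOf ['c','o','m','m','a']
      (pvRep ['_','d','o','t'] ['.']
        (pvRep ['_','e','x','c','l','a','m','a','t','i','o','n'] ['!']
          (pvRep ['_','q','u','e','s','t','i','o','n'] ['?'] t))) = false := by
    cases hc : List.isPrefixOf ['c','o','m','m','a'] _ with
    | false => rfl
    | true =>
      exact absurd (pvRep_prefix_back t _ (by decide) (by decide)
        (pvRep_prefix_back _ _ (by decide) (by decide)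
          (pvRep_prefix_back _ _ (by decide) (by decide) hc))) (by simp [h4])
  rw [pvRep_nomatch [','] (by simp [List.isPrefixOf, h4'])]
  have h5' : List.isPrefixOf ['c','o','l','o','n']
      (pvRep ['_','c','o','m','m','a'] [',']
        (pvRep ['_','d','o','t'] ['.']
          (pvRep ['_','e','x','c','l','a','m','a','t','i','o','n'] ['!']
            (pvRep ['_','q','u','e','s','t','i','o','n'] ['?'] t)))) = false := by
    cases hc : List.isPrefixOf ['c','o','l','o','n'] _ with
    | false => rfl
    | true =>
      exact absurd (pvRep_prefix_back t _ (by decide) (by decide)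
        (pvRep_prefix_back _ _ (by decide) (by decide)
          (pvRep_prefix_back _ _ (by decide) (by decide)
            (pvRep_prefix_back _ _ (by decide) (by decide) hc)))) (by simp [h5])
  rw [pvRep_nomatch [':'] (by simp [List.isPrefixOf, h5'])]
  have h6' : List.isPrefixOf ['s','e','m','i','c','o','l','o','n']
      (pvRep ['_','c','o','l','o','n'] [':']
        (pvRep ['_','c','o','m','m','a'] [',']
          (pvRep ['_','d','o','t'] ['.']
            (pvRep ['_','e','x','c','l','a','m','a','t','i','o','n'] ['!']
              (pvRep ['_','q','u','e','s','t','i','o','n'] ['?'] t))))) = false := by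
    cases hc : List.isPrefixOf ['s','e','m','i','c','o','l','o','n'] _ with
    | false => rfl
    | true =>
      exact absurd (pvRep_prefix_back t _ (by decide) (by decide)
        (pvRep_prefix_back _ _ (by decide) (by decide)
          (pvRep_prefix_back _ _ (by decide) (by decide)
            (pvRep_prefix_back _ _ (by decide) (by decide)
              (pvRep_prefix_back _ _ (by decide) (by decide) hc))))) (by simp [h6])
  rw [pvRep_nomatch [';'] (by simp [List.isPrefixOf, h6'])]
  rw [show ('_' :: pvRep ['_','s','e','m','i','c','o','l','o','n'] [';']
        (pvRep ['_','c','o','l','o','n'] [':']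
          (pvRep ['_','c','o','m','m','a'] [',']
            (pvRep ['_','d','o','t'] ['.']
              (pvRep ['_','e','x','c','l','a','m','a','t','i','o','n'] ['!']
                (pvRep ['_','q','u','e','s','t','i','o','n'] ['?'] t)))))) =
      ['_'] ++ _ from rfl, pvRep_match [' '] (by decide), List.singleton_append]

theorem pvChain_eq_scan :
    ∀ (n : Nat) (l : List Char), l.length ≤ n → pvChain l = pvScan l := by
  intro n
  induction n with
  | zero =>
    intro l hl
    have hnil : l = [] := by cases l <;> simp_all
    subst hnil
    rw [pvScan_nil]
    simp only [pvChain, pvRep_nil]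
  | succ m ih =>
    intro l hl
    cases l with
    | nil =>
      rw [pvScan_nil]
      simp only [pvChain, pvRep_nil]
    | cons c t =>
      simp only [List.length_cons] at hl
      by_cases hQ : List.isPrefixOf ['_','q','u','e','s','t','i','o','n'] (c :: t) = true
      · obtain ⟨r, hr⟩ := List.isPrefixOf_iff_prefix.mp hQ
        have hlen : r.length ≤ m := by
          have := congrArg List.length hr
          simp at this
          omega
        have hchain : pvChain (c :: t) = '?' :: pvChain r := by
          rw [← hr]
          exact pvChain_tokQ r
        have hsome : pvMatchTok (c :: t) = some ('?', 9) := by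
          unfold pvMatchTok
          rw [if_pos hQ]
        have hdrop : (c :: t).drop 9 = r := by
          rw [← hr]
          simp only [List.cons_append, List.nil_append, List.drop_succ_cons, List.drop_zero]
        rw [hchain, pvScan_cons_some hsome, hdrop, ih r hlen]
      ·
        by_cases hE : List.isPrefixOf ['_','e','x','c','l','a','m','a','t','i','o','n'] (c :: t) = true
        · obtain ⟨r, hr⟩ := List.isPrefixOf_iff_prefix.mp hE
          have hlen : r.length ≤ m := by
            have := congrArg List.length hr
            simp at this
            omega
          have hchain : pvChain (c :: t) = '!' :: pvChain r := by
            rw [← hr]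
            exact pvChain_tokE r
          have hsome : pvMatchTok (c :: t) = some ('!', 12) := by
            unfold pvMatchTok
            rw [if_neg hQ, if_pos hE]
          have hdrop : (c :: t).drop 12 = r := by
            rw [← hr]
            simp only [List.cons_append, List.nil_append, List.drop_succ_cons, List.drop_zero]
          rw [hchain, pvScan_cons_some hsome, hdrop, ih r hlen]
        ·
          by_cases hD : List.isPrefixOf ['_','d','o','t'] (c :: t) = true
          · obtain ⟨r, hr⟩ := List.isPrefixOf_iff_prefix.mp hD
            have hlen : r.length ≤ m := by
              have := congrArg List.length hr
              simp at this
              omega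
            have hchain : pvChain (c :: t) = '.' :: pvChain r := by
              rw [← hr]
              exact pvChain_tokD r
            have hsome : pvMatchTok (c :: t) = some ('.', 4) := by
              unfold pvMatchTok
              rw [if_neg hQ, if_neg hE, if_pos hD]
            have hdrop : (c :: t).drop 4 = r := by
              rw [← hr]
              simp only [List.cons_append, List.nil_append, List.drop_succ_cons, List.drop_zero]
            rw [hchain, pvScan_cons_some hsome, hdrop, ih r hlen]
          ·
            by_cases hCm : List.isPrefixOf ['_','c','o','m','m','a'] (c :: t) = true
            · obtain ⟨r, hr⟩ := List.isPrefixOf_iff_prefix.mp hCm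
              have hlen : r.length ≤ m := by
                have := congrArg List.length hr
                simp at this
                omega
              have hchain : pvChain (c :: t) = ',' :: pvChain r := by
                rw [← hr]
                exact pvChain_tokCm r
              have hsome : pvMatchTok (c :: t) = some (',', 6) := by
                unfold pvMatchTok
                rw [if_neg hQ, if_neg hE, if_neg hD, if_pos hCm]
              have hdrop : (c :: t).drop 6 = r := by
                rw [← hr]
                simp only [List.cons_append, List.nil_append, List.drop_succ_cons, List.drop_zero]
              rw [hchain, pvScan_cons_some hsome, hdrop, ih r hlen]
            ·
              by_cases hCl : List.isPrefixOf ['_','c','o','l','o','n'] (c :: t) = true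
              · obtain ⟨r, hr⟩ := List.isPrefixOf_iff_prefix.mp hCl
                have hlen : r.length ≤ m := by
                  have := congrArg List.length hr
                  simp at this
                  omega
                have hchain : pvChain (c :: t) = ':' :: pvChain r := by
                  rw [← hr]
                  exact pvChain_tokCl r
                have hsome : pvMatchTok (c :: t) = some (':', 6) := by
                  unfold pvMatchTok
                  rw [if_neg hQ, if_neg hE, if_neg hD, if_neg hCm, if_pos hCl]
                have hdrop : (c :: t).drop 6 = r := by
                  rw [← hr]
                  simp only [List.cons_append, List.nil_append, List.drop_succ_cons, List.drop_zero]
                rw [hchain, pvScan_cons_some hsome, hdrop, ih r hlen]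
              ·
                by_cases hS : List.isPrefixOf ['_','s','e','m','i','c','o','l','o','n'] (c :: t) = true
                · obtain ⟨r, hr⟩ := List.isPrefixOf_iff_prefix.mp hS
                  have hlen : r.length ≤ m := by
                    have := congrArg List.length hr
                    simp at this
                    omega
                  have hchain : pvChain (c :: t) = ';' :: pvChain r := by
                    rw [← hr]
                    exact pvChain_tokS r
                  have hsome : pvMatchTok (c :: t) = some (';', 10) := by
                    unfold pvMatchTok
                    rw [if_neg hQ, if_neg hE, if_neg hD, if_neg hCm, if_neg hCl, if_pos hS]
                  have hdrop : (c :: t).drop 10 = r := by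
                    rw [← hr]
                    simp only [List.cons_append, List.nil_append, List.drop_succ_cons, List.drop_zero]
                  rw [hchain, pvScan_cons_some hsome, hdrop, ih r hlen]
                ·
                  have hmt : pvMatchTok (c :: t) = none := by
                    unfold pvMatchTok
                    rw [if_neg hQ, if_neg hE, if_neg hD, if_neg hCm, if_neg hCl, if_neg hS]
                  by_cases hc : c = '_'
                  · subst hc
                    have hQ' : List.isPrefixOf (['q','u','e','s','t','i','o','n'] : List Char) t = false := by
                      cases hx : List.isPrefixOf (['q','u','e','s','t','i','o','n'] : List Char) t with
                      | false => rfl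
                      | true => exact absurd (by simp [List.isPrefixOf, hx]) hQ
                    have hE' : List.isPrefixOf (['e','x','c','l','a','m','a','t','i','o','n'] : List Char) t = false := by
                      cases hx : List.isPrefixOf (['e','x','c','l','a','m','a','t','i','o','n'] : List Char) t with
                      | false => rfl
                      | true => exact absurd (by simp [List.isPrefixOf, hx]) hE
                    have hD' : List.isPrefixOf (['d','o','t'] : List Char) t = false := by
                      cases hx : List.isPrefixOf (['d','o','t'] : List Char) t with
                      | false => rfl
                      | true => exact absurd (by simp [List.isPrefixOf, hx]) hD
                    have hCm' : List.isPrefixOf (['c','o','m','m','a'] : List Char) t = false := by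
                      cases hx : List.isPrefixOf (['c','o','m','m','a'] : List Char) t with
                      | false => rfl
                      | true => exact absurd (by simp [List.isPrefixOf, hx]) hCm
                    have hCl' : List.isPrefixOf (['c','o','l','o','n'] : List Char) t = false := by
                      cases hx : List.isPrefixOf (['c','o','l','o','n'] : List Char) t with
                      | false => rfl
                      | true => exact absurd (by simp [List.isPrefixOf, hx]) hCl
                    have hS' : List.isPrefixOf (['s','e','m','i','c','o','l','o','n'] : List Char) t = false := by
                      cases hx : List.isPrefixOf (['s','e','m','i','c','o','l','o','n'] : List Char) t with
                      | false => rfl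
                      | true => exact absurd (by simp [List.isPrefixOf, hx]) hS
                    rw [pvChain_under hQ' hE' hD' hCm' hCl' hS', pvScan_cons_none hmt]
                    simp only [if_pos]
                    rw [ih t (by omega)]
                  · rw [pvChain_push hc, pvScan_cons_none hmt]
                    simp only [if_neg hc]
                    rw [ih t (by omega)]

-- ===== VERDICT (by name: the statement is the Claim_ definition above) =====
theorem decode_filename_spec : Claim_equal_decode_filename := by
  intro name _
  unfold Spec_decode_filename decode_filename_alt
  rw [decode_eq_chain, pvChain_eq_scan name.toList.length name.toList le_rfl]
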